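-- pv_equiv track=rewrite | github.com/endo-lab/PeakMatch | peakmatch.py | MWNCM
-- ===== SOURCE A (Python) =====
-- def MWNCM(W): # W[i][j]: weight of edge {i,j}
--     n = len(W)
--     m = len(W[0])
--     # labelling phase
--     LN = [0] * m
--     L = [[0]*m for i in range(n)]
--     for i in range(n):
--         # Step 1
--         for j in range(m):
--             if j==0:
--                 L[i][j] = W[i][j]
--             else:
--                 L[i][j] = W[i][j] + max(LN[:j])
--         # Step 2
--         for j in range(m):
--             LN[j] = max(LN[j], L[i][j])
--     A = []
--     for i in range(n):
--         for j in range(m):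
--             A.append((i,j,L[i][j]))
--     A.sort(key=lambda a: -a[2])
--     # selection phase
--     E = []
--     i_min = n
--     j_min = m
--     for a in A:
--         if a[0]<i_min and a[1]<j_min:
--             i_min = a[0]
--             j_min = a[1]
--             E.append((a[0],a[1],W[a[0]][a[1]]))
--     return E
-- ===== SOURCE B (Python) =====
-- def MWNCM(W): # W[i][j]: weight of edge {i,j}
--     n = len(W)
--     m = len(W[0])
--     # labelling phase, fused: one pass per row keeping a running prefix-max of LN
--     LN = [0] * m
--     items = []
--     for i, row in enumerate(W):
--         run = 0
--         for j in range(m):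
--             lij = row[j] if j == 0 else row[j] + run
--             run = LN[j] if j == 0 else max(run, LN[j])
--             if lij > LN[j]:
--                 LN[j] = lij
--             items.append((i, j, lij))
--     items.sort(key=lambda a: -a[2])
--     # selection phase
--     E = []
--     i_min = n
--     j_min = m
--     for a in items:
--         if a[0] < i_min and a[1] < j_min:
--             i_min = a[0]
--             j_min = a[1]
--             E.append((a[0], a[1], W[a[0]][a[1]]))
--     return E
-- ===== Notes on version B (the rewrite author's own statement) =====
-- stated objective: faster
-- what changed: B fuses the two labelling loops into one pass per row that maintains a running prefix-maximum of LN and builds the item list inline, replacing A's per-cell max(LN[:j]) slice-and-scan, so the labelling phase drops from O(n*m^2) to O(n*m).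
-- outside the precondition, e.g. on MWNCM([]): A raises IndexError, B raises IndexError; on MWNCM([[1, 2], [3]]): A raises IndexError, B raises IndexError
import Mathlib
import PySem

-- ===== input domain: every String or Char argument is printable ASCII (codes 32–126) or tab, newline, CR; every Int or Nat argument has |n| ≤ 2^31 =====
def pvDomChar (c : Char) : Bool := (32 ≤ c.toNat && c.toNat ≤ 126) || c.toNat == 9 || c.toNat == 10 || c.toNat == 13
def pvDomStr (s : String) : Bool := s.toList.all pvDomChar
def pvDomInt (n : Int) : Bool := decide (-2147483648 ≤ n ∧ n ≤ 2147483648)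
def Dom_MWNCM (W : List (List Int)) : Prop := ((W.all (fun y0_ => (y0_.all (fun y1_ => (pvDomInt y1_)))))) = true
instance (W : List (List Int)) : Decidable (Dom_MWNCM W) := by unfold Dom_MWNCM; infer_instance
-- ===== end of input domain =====

-- B fuses the labelling loops and maintains a RUNNING prefix-maximum of LN instead of
-- recomputing max(LN[:j]) for every j (objective: faster, asymptotic in the labelling phase).

-- shared primitive helpers (exact for in-range indices, which Pre_ guarantees)
def pvGetI (xs : List Int) (i : Int) : Int := PySem.List.pyGetD xs i 0
def pvGetRow (L : List (List Int)) (i : Int) : List Int := PySem.List.pyGetD L i []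
-- Python max(xs) over a nonempty int list (value-exact; only called on nonempty slices)
def pvMax : List Int → Int
  | [] => 0
  | x :: xs => xs.foldl max x
-- the selection phase, identical line for line in A and in B
def pvSelect (W : List (List Int)) (n m : Int) (A : List (Int × Int × Int)) : List (Int × Int × Int) :=
  (A.foldl (fun (st : List (Int × Int × Int) × Int × Int) a =>
      if a.1 < st.2.1 ∧ a.2.1 < st.2.2 then
        (st.1 ++ [(a.1, a.2.1, pvGetI (pvGetRow W a.1) a.2.1)], a.1, a.2.1)
      else st) ([], n, m)).1

-- ===== PORT A =====
def pvAstep1 (W : List (List Int)) (LN : List Int) (L : List (List Int)) (i m : Int) :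
    List (List Int) :=
  (PySem.List.pyRange 0 m 1).foldl (fun L j =>
    if j = 0 then
      PySem.List.pySetD L i (PySem.List.pySetD (pvGetRow L i) j (pvGetI (pvGetRow W i) j))
    else
      PySem.List.pySetD L i (PySem.List.pySetD (pvGetRow L i) j
        (pvGetI (pvGetRow W i) j + pvMax (PySem.List.slice LN none (some j))))) L

def pvAstep2 (LN : List Int) (L : List (List Int)) (i m : Int) : List Int :=
  (PySem.List.pyRange 0 m 1).foldl (fun LN j =>
    PySem.List.pySetD LN j (max (pvGetI LN j) (pvGetI (pvGetRow L i) j))) LN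

def pvAlabel (W : List (List Int)) (n m : Int) : List Int × List (List Int) :=
  (PySem.List.pyRange 0 n 1).foldl (fun st i =>
    let L' := pvAstep1 W st.1 st.2 i m
    (pvAstep2 st.1 L' i m, L'))
    (List.replicate m.toNat 0, (PySem.List.pyRange 0 n 1).map (fun _ => List.replicate m.toNat 0))

def pvAitems (L : List (List Int)) (n m : Int) : List (Int × Int × Int) :=
  (PySem.List.pyRange 0 n 1).foldl (fun A i =>
    (PySem.List.pyRange 0 m 1).foldl (fun A j => A ++ [(i, j, pvGetI (pvGetRow L i) j)]) A) []

def MWNCM (W : List (List Int)) : List (Int × Int × Int) :=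
  let n : Int := (W.length : Int)
  let m : Int := ((PySem.List.pyGetD W 0 []).length : Int)
  let A := pvAitems (pvAlabel W n m).2 n m
  pvSelect W n m (PySem.List.sorted A (fun a => -a.2.2) false)

-- ===== PORT B =====
def pvBrow (LN : List Int) (row : List Int) (i m : Int) (items : List (Int × Int × Int)) :
    List Int × List (Int × Int × Int) :=
  let r := (PySem.List.pyRange 0 m 1).foldl
    (fun (q : Int × List Int × List (Int × Int × Int)) j =>
      let run := q.1
      let LN := q.2.1
      let items := q.2.2
      let lij := if j = 0 then pvGetI row j else pvGetI row j + run
      let run' := if j = 0 then pvGetI LN j else max run (pvGetI LN j)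
      let LN' := if pvGetI LN j < lij then PySem.List.pySetD LN j lij else LN
      (run', LN', items ++ [(i, j, lij)])) (0, LN, items)
  (r.2.1, r.2.2)

def pvBlabel (W : List (List Int)) (m : Int) : List Int × List (Int × Int × Int) :=
  (PySem.List.enumerate W 0).foldl (fun st p => pvBrow st.1 p.2 p.1 m st.2)
    (List.replicate m.toNat 0, [])

def MWNCM_alt (W : List (List Int)) : List (Int × Int × Int) :=
  let n : Int := (W.length : Int)
  let m : Int := ((PySem.List.pyGetD W 0 []).length : Int)
  let items := (pvBlabel W m).2
  pvSelect W n m (PySem.List.sorted items (fun a => -a.2.2) false)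

-- ===== PRECONDITION & SPEC =====
-- Pre_ excludes exactly the inputs where the Python A raises IndexError:
-- the empty list (W[0]) and rows shorter than the first row (W[i][j], j < len(W[0])).
def Pre_MWNCM (W : List (List Int)) : Prop :=
  W ≠ [] ∧ ∀ r ∈ W, (W.headD []).length ≤ r.length
instance (W : List (List Int)) : Decidable (Pre_MWNCM W) := by unfold Pre_MWNCM; infer_instance

def pvWitness_MWNCM : List (List Int) := [[3, -1, 2], [0, 5, -2]]

def Spec_MWNCM (W : List (List Int)) (out : List (Int × Int × Int)) : Prop := out = MWNCM_alt W
instance (W : List (List Int)) (out : List (Int × Int × Int)) : Decidable (Spec_MWNCM W out) := by unfold Spec_MWNCM; infer_instance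

-- ===== CLAIM (what is proved, stated in full; the proofs are below) =====
def Claim_equal_MWNCM : Prop :=
  ∀ (W : List (List Int)), Dom_MWNCM W → Pre_MWNCM W → Spec_MWNCM W (MWNCM W)

-- ===== LEMMAS AND PROOFS =====

-- proof-side spec functions (used only by the proofs below)
def rowGo (run : Int) : List Int → List Int → List Int × List Int
  | a :: ln, w :: rw =>
      let r := rowGo (max run a) ln rw
      (max a (w + run) :: r.1, (w + run) :: r.2)
  | ln, _ => (ln, [])

def rowSpec : List Int → List Int → List Int × List Int
  | a :: ln, w :: rw =>
      let r := rowGo a ln rw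
      (max a w :: r.1, w :: r.2)
  | ln, _ => (ln, [])

def trip (i : Int) : Int → List Int → List (Int × Int × Int)
  | _, [] => []
  | j, v :: vs => (i, j, v) :: trip i (j + 1) vs

def chainLN : List Int → List (List Int) → List Int
  | ln, [] => ln
  | ln, row :: rows => chainLN (rowSpec ln row).1 rows

def chainRows : List Int → List (List Int) → List (List Int)
  | _, [] => []
  | ln, row :: rows => (rowSpec ln row).2 :: chainRows (rowSpec ln row).1 rows

def joinRows (i : Int) : List (List Int) → List (Int × Int × Int)
  | [] => []
  | r :: rs => trip i 0 r ++ joinRows (i + 1) rs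

lemma rowGo_fst_length (run : Int) (ln rw : List Int) :
    (rowGo run ln rw).1.length = ln.length := by
  induction ln generalizing run rw with
  | nil => cases rw <;> simp [rowGo]
  | cons a ln ih => cases rw with
    | nil => simp [rowGo]
    | cons w rw => simp [rowGo, ih]

lemma rowGo_snd (run : Int) (ln rw : List Int) (h : ln.length ≤ rw.length) :
    (rowGo run ln rw).2
      = (List.range ln.length).map (fun k => rw.getD k 0 + (ln.take k).foldl max run) := by
  induction ln generalizing run rw with
  | nil => cases rw <;> simp [rowGo]
  | cons a ln ih =>
    cases rw with
    | nil => simp at h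
    | cons w rw =>
      simp only [rowGo, List.length_cons, List.range_succ_eq_map, List.map_cons, List.map_map]
      congr 1
      rw [ih (max run a) rw (by simpa using h)]
      apply List.map_congr_left
      intro k hk
      simp

lemma rowGo_fst (run : Int) (ln rw : List Int) (h : ln.length ≤ rw.length) :
    (rowGo run ln rw).1
      = (List.range ln.length).map
          (fun k => max (ln.getD k 0) ((rowGo run ln rw).2.getD k 0)) := by
  induction ln generalizing run rw with
  | nil => cases rw <;> simp [rowGo]
  | cons a ln ih =>
    cases rw with
    | nil => simp at h
    | cons w rw =>
      simp only [rowGo, List.length_cons, List.range_succ_eq_map, List.map_cons, List.map_map]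
      congr 1
      rw [ih (max run a) rw (by simpa using h)]
      apply List.map_congr_left
      intro k hk
      simp

lemma rowSpec_fst_length (ln rw : List Int) : (rowSpec ln rw).1.length = ln.length := by
  cases ln with
  | nil => cases rw <;> simp [rowSpec]
  | cons a ln => cases rw with
    | nil => simp [rowSpec]
    | cons w rw => simp [rowSpec, rowGo_fst_length]

lemma rowSpec_snd_length (ln rw : List Int) (h : ln.length ≤ rw.length) :
    (rowSpec ln rw).2.length = ln.length := by
  cases ln with
  | nil => cases rw <;> simp [rowSpec]
  | cons a ln => cases rw with
    | nil => simp at h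
    | cons w rw =>
      simp [rowSpec, rowGo_snd a ln rw (by simpa using h)]

lemma rowSpec_snd_eq (ln rw : List Int) (h : ln.length ≤ rw.length) :
    (rowSpec ln rw).2
      = (List.range ln.length).map
          (fun j => if j = 0 then rw.getD 0 0 else rw.getD j 0 + pvMax (ln.take j)) := by
  cases ln with
  | nil => cases rw <;> simp [rowSpec]
  | cons a ln =>
    cases rw with
    | nil => simp at h
    | cons w rw =>
      simp only [rowSpec, List.length_cons, List.range_succ_eq_map, List.map_cons, List.map_map]
      congr 1
      rw [rowGo_snd a ln rw (by simpa using h)]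
      apply List.map_congr_left
      intro k hk
      simp [pvMax]

lemma rowSpec_fst_eq (ln rw : List Int) (h : ln.length ≤ rw.length) :
    (rowSpec ln rw).1
      = (List.range ln.length).map
          (fun j => max (ln.getD j 0) ((rowSpec ln rw).2.getD j 0)) := by
  cases ln with
  | nil => cases rw <;> simp [rowSpec]
  | cons a ln =>
    cases rw with
    | nil => simp at h
    | cons w rw =>
      simp only [rowSpec, List.length_cons, List.range_succ_eq_map, List.map_cons, List.map_map]
      congr 1
      rw [rowGo_fst a ln rw (by simpa using h)]
      apply List.map_congr_left
      intro k hk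
      simp

lemma pvGetI_append_length (pre : List Int) (a : Int) (ln : List Int) :
    pvGetI (pre ++ a :: ln) (pre.length : Int) = a := by
  simp [pvGetI]

lemma pvGetRow_append_length (pre : List (List Int)) (r : List Int) (rest : List (List Int)) :
    pvGetRow (pre ++ r :: rest) (pre.length : Int) = r := by
  simp [pvGetRow]

lemma set_append_length {α : Type} (pre : List α) (a v : α) (ln : List α) :
    (pre ++ a :: ln).set pre.length v = pre ++ v :: ln := by
  rw [List.set_append_right _ _ (le_refl _)]
  simp

lemma foldl_set1_go (g : Int → Int) (t : Nat) : ∀ (s : Nat) (pre ln : List Int),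
    pre.length = s → ln.length = t →
    (PySem.List.pyRange (s : Int) ((s : Int) + (t : Int)) 1).foldl
      (fun LN j => PySem.List.pySetD LN j (max (pvGetI LN j) (g j))) (pre ++ ln)
    = pre ++ (List.range t).map (fun k => max (ln.getD k 0) (g (((s + k : Nat)) : Int))) := by
  induction t with
  | zero =>
    intro s pre ln hs hl
    rw [List.length_eq_zero_iff] at hl
    subst hl
    simp [PySem.List.pyRange_one_eq_nil]
  | succ t ih =>
    intro s pre ln hs hl
    cases ln with
    | nil => simp at hl
    | cons a ln =>
      rw [PySem.List.pyRange_one_cons (by push_cast; omega)]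
      simp only [List.foldl_cons]
      have h1 : pvGetI (pre ++ a :: ln) (s : Int) = a := by
        rw [← hs]; exact pvGetI_append_length pre a ln
      have h2 : PySem.List.pySetD (pre ++ a :: ln) (s : Int) (max a (g s)) =
          (pre ++ [max a (g s)]) ++ ln := by
        rw [PySem.List.pySetD_natCast, ← hs, set_append_length, List.append_cons]
      rw [h1, h2]
      have := ih (s + 1) (pre ++ [max a (g s)]) ln (by simp [hs]) (by simpa using hl)
      rw [show (s : Int) + 1 = ((s + 1 : Nat) : Int) from by push_cast; ring,
          show (s : Int) + ((t + 1 : Nat) : Int) = ((s + 1 : Nat) : Int) + (t : Int) from by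
            push_cast; ring, this, List.append_assoc]
      congr 1
      rw [List.range_succ_eq_map, List.map_cons, List.map_map]
      simp only [List.singleton_append, List.getD_cons_zero, Nat.add_zero]
      congr 1
      apply List.map_congr_left
      intro k hk
      simp only [Function.comp, List.getD_cons_succ]
      congr 2
      omega

lemma foldl_set2_go (g : Int → Int) (i : Nat) (t : Nat) :
    ∀ (s : Nat) (L : List (List Int)) (rpre rln : List Int) (hi : i < L.length),
    L[i] = rpre ++ rln → rpre.length = s → rln.length = t →
    (PySem.List.pyRange (s : Int) ((s : Int) + (t : Int)) 1).foldl
      (fun L j => PySem.List.pySetD L (i : Int)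
        (PySem.List.pySetD (pvGetRow L (i : Int)) j (g j))) L
    = L.set i (rpre ++ (List.range t).map (fun k => g (((s + k : Nat)) : Int))) := by
  induction t with
  | zero =>
    intro s L rpre rln hi hrow hs hl
    rw [List.length_eq_zero_iff] at hl
    subst hl
    simp only [List.append_nil] at hrow
    simp [PySem.List.pyRange_one_eq_nil, ← hrow, List.set_getElem_self hi]
  | succ t ih =>
    intro s L rpre rln hi hrow hs hl
    cases rln with
    | nil => simp at hl
    | cons a rln =>
      rw [PySem.List.pyRange_one_cons (by push_cast; omega)]
      simp only [List.foldl_cons]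
      have hrowget : pvGetRow L (i : Int) = rpre ++ a :: rln := by
        simp [pvGetRow, List.getD_eq_getElem?_getD, List.getElem?_eq_getElem hi, hrow]
      have h2 : PySem.List.pySetD (pvGetRow L (i : Int)) (s : Int) (g s) =
          (rpre ++ [g (s : Int)]) ++ rln := by
        rw [hrowget, PySem.List.pySetD_natCast, ← hs, set_append_length, List.append_cons]
      rw [h2, PySem.List.pySetD_natCast]
      set L' := L.set i ((rpre ++ [g (s : Int)]) ++ rln) with hL'
      have hi' : i < L'.length := by simpa [hL'] using hi
      have hrow' : L'[i] = (rpre ++ [g (s : Int)]) ++ rln := by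
        simp [hL', List.getElem_set_self]
      have := ih (s + 1) L' (rpre ++ [g (s : Int)]) rln hi' hrow' (by simp [hs]) (by simpa using hl)
      rw [show (s : Int) + 1 = ((s + 1 : Nat) : Int) from by push_cast; ring,
          show (s : Int) + ((t + 1 : Nat) : Int) = ((s + 1 : Nat) : Int) + (t : Int) from by
            push_cast; ring, this, hL', List.set_set]
      congr 1
      rw [List.append_assoc]
      congr 1
      rw [List.range_succ_eq_map, List.map_cons, List.map_map]
      simp only [List.singleton_append, Nat.add_zero]
      congr 1
      apply List.map_congr_left
      intro k hk
      simp only [Function.comp]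
      congr 1
      omega

lemma step1_spec (W : List (List Int)) (LN : List Int) (L : List (List Int)) (i m : Nat)
    (hi : i < L.length) (hrow : L[i].length = m) (hln : LN.length = m)
    (hw : m ≤ (pvGetRow W (i : Int)).length) :
    pvAstep1 W LN L (i : Int) (m : Int)
      = L.set i ((rowSpec LN (pvGetRow W (i : Int))).2) := by
  unfold pvAstep1
  have hfun : (fun (L : List (List Int)) (j : Int) =>
      if j = 0 then
        PySem.List.pySetD L (i : Int)
          (PySem.List.pySetD (pvGetRow L (i : Int)) j (pvGetI (pvGetRow W (i : Int)) j))
      else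
        PySem.List.pySetD L (i : Int)
          (PySem.List.pySetD (pvGetRow L (i : Int)) j
             (pvGetI (pvGetRow W (i : Int)) j + pvMax (PySem.List.slice LN none (some j)))))
    = (fun (L : List (List Int)) (j : Int) =>
        PySem.List.pySetD L (i : Int)
          (PySem.List.pySetD (pvGetRow L (i : Int)) j
            (if j = 0 then pvGetI (pvGetRow W (i : Int)) j
             else pvGetI (pvGetRow W (i : Int)) j + pvMax (PySem.List.slice LN none (some j))))) := by
    funext L j
    split <;> rfl
  rw [hfun]
  have h0 : (0 : Int) = ((0 : Nat) : Int) := rfl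
  rw [show PySem.List.pyRange 0 (m : Int) 1
        = PySem.List.pyRange ((0 : Nat) : Int) (((0 : Nat) : Int) + (m : Int)) 1 from by
      norm_num]
  rw [foldl_set2_go _ i m 0 L [] L[i] hi (by simp) rfl hrow]
  congr 1
  rw [rowSpec_snd_eq LN _ (by rw [hln]; exact hw), hln]
  simp only [List.nil_append]
  apply List.map_congr_left
  intro k hk
  simp only [Nat.zero_add]
  by_cases hk0 : k = 0
  · subst hk0; simp [pvGetI, PySem.List.pyGetD_zero]
  · rw [if_neg (by exact_mod_cast hk0), if_neg hk0]
    congr 1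
    · simp [pvGetI]
    · rw [PySem.List.slice_to_natCast]

lemma step2_spec (LN : List Int) (L' : List (List Int)) (rw0 : List Int) (i m : Nat)
    (hi : i < L'.length) (hrow : L'[i] = (rowSpec LN rw0).2) (hln : LN.length = m)
    (hw : m ≤ rw0.length) :
    pvAstep2 LN L' (i : Int) (m : Int) = (rowSpec LN rw0).1 := by
  unfold pvAstep2
  rw [show PySem.List.pyRange 0 (m : Int) 1
        = PySem.List.pyRange ((0 : Nat) : Int) (((0 : Nat) : Int) + (m : Int)) 1 from by
      norm_num]
  have hfold := foldl_set1_go (fun j => pvGetI (pvGetRow L' (i : Int)) j) m 0 [] LN rfl hln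
  simp only [List.nil_append] at hfold
  rw [hfold]
  rw [rowSpec_fst_eq LN rw0 (by rw [hln]; exact hw), hln]
  apply List.map_congr_left
  intro k hk
  simp only [Nat.zero_add]
  congr 1
  have : pvGetRow L' (i : Int) = (rowSpec LN rw0).2 := by
    simp [pvGetRow, List.getD_eq_getElem?_getD, List.getElem?_eq_getElem hi, hrow]
  rw [this]
  simp [pvGetI]

lemma label_go (m : Nat) : ∀ (rows W0 done : List (List Int)) (ln : List Int),
    W0.length = done.length → ln.length = m → (∀ r ∈ rows, m ≤ r.length) →
    (PySem.List.pyRange (done.length : Int) ((done.length : Int) + (rows.length : Int)) 1).foldl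
      (fun st i =>
        (pvAstep2 st.1 (pvAstep1 (W0 ++ rows) st.1 st.2 i (m : Int)) i (m : Int),
         pvAstep1 (W0 ++ rows) st.1 st.2 i (m : Int)))
      (ln, done ++ List.replicate rows.length (List.replicate m 0))
    = (chainLN ln rows, done ++ chainRows ln rows) := by
  intro rows
  induction rows with
  | nil =>
    intro W0 done ln hs hln hrows
    simp [PySem.List.pyRange_one_eq_nil, chainLN, chainRows]
  | cons row rest ih =>
    intro W0 done ln hs hln hrows
    rw [PySem.List.pyRange_one_cons (by push_cast [List.length_cons]; omega)]
    simp only [List.foldl_cons, List.length_cons, List.replicate_succ]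
    set zr := List.replicate m (0 : Int) with hzr
    have hi : done.length < (done ++ zr :: List.replicate rest.length zr).length := by simp
    have hLi : (done ++ zr :: List.replicate rest.length zr)[done.length]'hi = zr := by
      rw [List.getElem_append_right (le_refl _)]
      simp
    have hwrow : pvGetRow (W0 ++ row :: rest) (done.length : Int) = row := by
      rw [← hs]; exact pvGetRow_append_length W0 row rest
    have h1 : pvAstep1 (W0 ++ row :: rest) ln (done ++ zr :: List.replicate rest.length zr)
        (done.length : Int) (m : Int)
        = done ++ (rowSpec ln row).2 :: List.replicate rest.length zr := by
      rw [step1_spec _ _ _ _ _ hi (by rw [hLi, hzr]; simp) hln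
            (by rw [hwrow]; exact hrows row (by simp))]
      rw [hwrow, set_append_length]
    have h2 : pvAstep2 ln (done ++ (rowSpec ln row).2 :: List.replicate rest.length zr)
        (done.length : Int) (m : Int) = (rowSpec ln row).1 := by
      apply step2_spec ln _ row _ m (by simp) _ hln (hrows row (by simp))
      rw [List.getElem_append_right (le_refl _)]
      simp
    simp only [h1, h2]
    have hcast1 : (done.length : Int) + 1 = (((done ++ [(rowSpec ln row).2]).length : Nat) : Int) := by
      simp
    have hcast2 : (done.length : Int) + ((rest.length + 1 : Nat) : Int)
        = (((done ++ [(rowSpec ln row).2]).length : Nat) : Int) + (rest.length : Int) := by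
      push_cast; simp; ring
    rw [hcast1, hcast2]
    have hW0' : (W0 ++ [row]).length = (done ++ [(rowSpec ln row).2]).length := by simp [hs]
    have := ih (W0 ++ [row]) (done ++ [(rowSpec ln row).2]) (rowSpec ln row).1 hW0'
      (by rw [rowSpec_fst_length]; exact hln) (fun r hr => hrows r (by simp [hr]))
    simp only [List.append_assoc, List.singleton_append] at this
    rw [this]
    simp [chainLN, chainRows]

lemma pvAlabel_spec (W : List (List Int)) (m : Nat)
    (hrows : ∀ r ∈ W, m ≤ r.length) :
    pvAlabel W (W.length : Int) (m : Int)
      = (chainLN (List.replicate m 0) W, chainRows (List.replicate m 0) W) := by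
  have h := label_go m W [] [] (List.replicate m 0) rfl (by simp) hrows
  simp only [List.length_nil, Nat.cast_zero, zero_add, List.nil_append] at h
  unfold pvAlabel
  have hinit : (PySem.List.pyRange 0 (W.length : Int) 1).map
      (fun _ => List.replicate ((m : Int)).toNat (0 : Int))
      = List.replicate W.length (List.replicate m 0) := by
    rw [List.map_const']
    simp [PySem.List.length_pyRange_one]
  rw [hinit]
  exact h

lemma map_pyRange_trip (i : Int) : ∀ (suf pre : List Int),
    (PySem.List.pyRange (pre.length : Int) ((pre.length : Int) + (suf.length : Int)) 1).map
      (fun j => ((i, j, pvGetI (pre ++ suf) j) : Int × Int × Int))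
    = trip i (pre.length : Int) suf := by
  intro suf
  induction suf with
  | nil => intro pre; simp [PySem.List.pyRange_one_eq_nil, trip]
  | cons v suf ih =>
    intro pre
    rw [PySem.List.pyRange_one_cons (by push_cast [List.length_cons]; omega)]
    rw [List.map_cons, pvGetI_append_length]
    have := ih (pre ++ [v])
    simp only [List.length_append, List.length_cons, List.length_nil, List.append_assoc,
      List.singleton_append, Nat.cast_add, Nat.cast_one, zero_add] at this ⊢
    rw [show (pre.length : Int) + ((suf.length : Int) + 1)
          = ((pre.length : Int) + 1) + (suf.length : Int) from by ring]
    rw [this, trip]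

lemma inner_items (i : Int) (row : List Int) (m : Nat) (hr : row.length = m)
    (A0 : List (Int × Int × Int)) :
    (PySem.List.pyRange 0 (m : Int) 1).foldl
      (fun A j => A ++ [((i, j, pvGetI row j) : Int × Int × Int)]) A0
    = A0 ++ trip i 0 row := by
  rw [PySem.List.foldl_append_singleton_eq_map]
  congr 1
  have := map_pyRange_trip i row []
  simp only [List.length_nil, Nat.cast_zero, zero_add, List.nil_append, ← hr] at this ⊢
  exact this

lemma itemsA_go (m : Nat) : ∀ (rs done : List (List Int)) (acc : List (Int × Int × Int)),
    (∀ r ∈ rs, r.length = m) →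
    (PySem.List.pyRange (done.length : Int) ((done.length : Int) + (rs.length : Int)) 1).foldl
      (fun A i => (PySem.List.pyRange 0 (m : Int) 1).foldl
        (fun A j => A ++ [((i, j, pvGetI (pvGetRow (done ++ rs) i) j) : Int × Int × Int)]) A) acc
    = acc ++ joinRows (done.length : Int) rs := by
  intro rs
  induction rs with
  | nil => intro done acc _; simp [PySem.List.pyRange_one_eq_nil, joinRows]
  | cons r rest ih =>
    intro done acc hrs
    rw [PySem.List.pyRange_one_cons
      (show (done.length : Int) < (done.length : Int) + ((r :: rest).length : Int) from by
        push_cast [List.length_cons]; omega)]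
    simp only [List.foldl_cons]
    have hrow : pvGetRow (done ++ r :: rest) (done.length : Int) = r :=
      pvGetRow_append_length done r rest
    rw [hrow, inner_items _ r m (hrs r (by simp)) acc]
    have := ih (done ++ [r]) (acc ++ trip (done.length : Int) 0 r)
      (fun x hx => hrs x (by simp [hx]))
    simp only [List.length_append, List.length_cons, List.length_nil, List.append_assoc,
      List.singleton_append, Nat.cast_add, Nat.cast_one, zero_add] at this ⊢
    rw [show (done.length : Int) + ((rest.length : Int) + 1)
          = ((done.length : Int) + 1) + (rest.length : Int) from by ring]
    rw [this, joinRows]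

lemma chainRows_length (ln : List Int) (rows : List (List Int)) :
    (chainRows ln rows).length = rows.length := by
  induction rows generalizing ln with
  | nil => simp [chainRows]
  | cons r rest ih => simp [chainRows, ih]

lemma chainRows_row_len (m : Nat) (rows : List (List Int)) : ∀ (ln : List Int),
    ln.length = m → (∀ r ∈ rows, m ≤ r.length) →
    ∀ r ∈ chainRows ln rows, r.length = m := by
  induction rows with
  | nil => intro ln _ _ r hr; simp [chainRows] at hr
  | cons row rest ih =>
    intro ln hln hrows r hr
    simp only [chainRows, List.mem_cons] at hr
    rcases hr with h | h
    · rw [h, rowSpec_snd_length ln row (by rw [hln]; exact hrows row (by simp))]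
      exact hln
    · exact ih (rowSpec ln row).1 (by rw [rowSpec_fst_length]; exact hln)
        (fun x hx => hrows x (by simp [hx])) r h

lemma pvAitems_spec (L : List (List Int)) (m : Nat)
    (hrs : ∀ r ∈ L, r.length = m) :
    pvAitems L (L.length : Int) (m : Int) = joinRows 0 L := by
  unfold pvAitems
  have := itemsA_go m L [] [] hrs
  simpa using this

lemma pvBrow_go (i : Int) (row : List Int) : ∀ (ln pre wpre wrest : List Int)
    (run : Int) (items : List (Int × Int × Int)),
    pre ≠ [] → row = wpre ++ wrest → pre.length = wpre.length → ln.length ≤ wrest.length →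
    (PySem.List.pyRange (pre.length : Int) ((pre.length : Int) + (ln.length : Int)) 1).foldl
      (fun (q : Int × List Int × List (Int × Int × Int)) j =>
        let run := q.1
        let LN := q.2.1
        let items := q.2.2
        let lij := if j = 0 then pvGetI row j else pvGetI row j + run
        let run' := if j = 0 then pvGetI LN j else max run (pvGetI LN j)
        let LN' := if pvGetI LN j < lij then PySem.List.pySetD LN j lij else LN
        (run', LN', items ++ [(i, j, lij)])) (run, pre ++ ln, items)
    = (ln.foldl max run, pre ++ (rowGo run ln wrest).1,
       items ++ trip i (pre.length : Int) (rowGo run ln wrest).2) := by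
  intro ln
  induction ln with
  | nil =>
    intro pre wpre wrest run items hpre hrow hlen hle
    simp [PySem.List.pyRange_one_eq_nil, rowGo, trip]
  | cons a ln ih =>
    intro pre wpre wrest run items hpre hrow hlen hle
    cases wrest with
    | nil => simp at hle
    | cons w wrest =>
      rw [PySem.List.pyRange_one_cons
        (show (pre.length : Int) < (pre.length : Int) + ((a :: ln).length : Int) from by
          push_cast [List.length_cons]; omega)]
      simp only [List.foldl_cons]
      have hj0 : ((pre.length : Int) = 0) = False := by
        simp only [eq_iff_iff, iff_false]
        have : 0 < pre.length := List.length_pos_iff.mpr hpre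
        omega
      have hln : pvGetI (pre ++ a :: ln) (pre.length : Int) = a := pvGetI_append_length pre a ln
      have hw : pvGetI row (pre.length : Int) = w := by
        rw [hrow, hlen]; exact pvGetI_append_length wpre w wrest
      have hset : (if a < w + run
          then PySem.List.pySetD (pre ++ a :: ln) (pre.length : Int) (w + run)
          else pre ++ a :: ln) = pre ++ max a (w + run) :: ln := by
        rw [PySem.List.pySetD_natCast, set_append_length]
        by_cases hc : a < w + run
        · rw [if_pos hc, max_eq_right (le_of_lt hc)]
        · rw [if_neg hc, max_eq_left (by omega)]
      simp only [hj0, if_false, hln, hw, hset]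
      have := ih (pre ++ [max a (w + run)]) (wpre ++ [w]) wrest (max run a)
        (items ++ [(i, (pre.length : Int), w + run)]) (by simp)
        (by rw [hrow]; simp) (by simp [hlen]) (by simpa using hle)
      simp only [List.length_append, List.length_cons, List.length_nil, List.append_assoc,
        List.singleton_append, Nat.cast_add, Nat.cast_one, zero_add] at this ⊢
      rw [show (pre.length : Int) + ((ln.length : Int) + 1)
            = ((pre.length : Int) + 1) + (ln.length : Int) from by ring]
      rw [this]
      simp only [rowGo, trip]

lemma pvBrow_spec (ln row : List Int) (i : Int) (m : Nat) (hln : ln.length = m)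
    (hle : m ≤ row.length) (items : List (Int × Int × Int)) :
    pvBrow ln row i (m : Int) items
      = ((rowSpec ln row).1, items ++ trip i 0 (rowSpec ln row).2) := by
  unfold pvBrow
  cases ln with
  | nil =>
    have hm : m = 0 := by simpa using hln.symm
    subst hm
    simp [PySem.List.pyRange_one_eq_nil, rowSpec, trip]
  | cons a ln =>
    cases row with
    | nil => rw [← hln] at hle; simp at hle
    | cons w rw' =>
      rw [PySem.List.pyRange_one_cons (show (0 : Int) < (m : Int) from by
        rw [← hln]; push_cast [List.length_cons]; omega)]
      simp only [List.foldl_cons, if_true]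
      have h0 : pvGetI (w :: rw') 0 = w := by simp [pvGetI, PySem.List.pyGetD_zero]
      have h0' : pvGetI (a :: ln) 0 = a := by simp [pvGetI, PySem.List.pyGetD_zero]
      have hset : (if a < w
          then PySem.List.pySetD (a :: ln) 0 w
          else a :: ln) = max a w :: ln := by
        rw [show (0 : Int) = ((0 : Nat) : Int) from rfl, PySem.List.pySetD_natCast]
        by_cases hc : a < w
        · rw [if_pos hc, max_eq_right (le_of_lt hc)]; rfl
        · rw [if_neg hc, max_eq_left (by omega)]
      simp only [h0, h0', hset]
      have hgo := pvBrow_go i (w :: rw') ln [max a w] [w] rw' a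
        (items ++ [(i, 0, w)]) (by simp) (by simp) (by simp) (by
          have := hle
          rw [← hln] at this
          simpa using this)
      simp only [List.length_cons, List.length_nil, Nat.cast_one, zero_add,
        List.singleton_append, List.append_assoc] at hgo ⊢
      rw [show (m : Int) = 1 + (ln.length : Int) from by
        rw [← hln]; push_cast [List.length_cons]; ring]
      rw [hgo]
      simp [rowSpec, trip]

lemma pvBlabel_go (m : Nat) : ∀ (rows : List (List Int)) (i0 : Int) (ln : List Int)
    (items : List (Int × Int × Int)),
    ln.length = m → (∀ r ∈ rows, m ≤ r.length) →
    (PySem.List.enumerate rows i0).foldl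
      (fun st p => pvBrow st.1 p.2 p.1 (m : Int) st.2) (ln, items)
    = (chainLN ln rows, items ++ joinRows i0 (chainRows ln rows)) := by
  intro rows
  induction rows with
  | nil =>
    intro i0 ln items _ _
    simp [PySem.List.enumerate_nil, chainLN, chainRows, joinRows]
  | cons row rest ih =>
    intro i0 ln items hln hrows
    rw [PySem.List.enumerate_cons]
    simp only [List.foldl_cons]
    rw [pvBrow_spec ln row i0 m hln (hrows row (by simp)) items]
    rw [ih (i0 + 1) (rowSpec ln row).1 (items ++ trip i0 0 (rowSpec ln row).2)
      (by rw [rowSpec_fst_length]; exact hln) (fun r hr => hrows r (by simp [hr]))]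
    simp [chainLN, chainRows, joinRows]

lemma pvBlabel_spec (W : List (List Int)) (m : Nat)
    (hrows : ∀ r ∈ W, m ≤ r.length) :
    pvBlabel W (m : Int)
      = (chainLN (List.replicate m 0) W,
         joinRows 0 (chainRows (List.replicate m 0) W)) := by
  unfold pvBlabel
  rw [show ((m : Int)).toNat = m from by simp]
  have := pvBlabel_go m W 0 (List.replicate m 0) [] (by simp) hrows
  simpa using this

theorem MWNCM_eq (W : List (List Int)) (h : Pre_MWNCM W) : MWNCM W = MWNCM_alt W := by
  obtain ⟨hne, hrows⟩ := h
  obtain ⟨r0, rest, rfl⟩ := List.exists_cons_of_ne_nil hne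
  have hrows' : ∀ r ∈ r0 :: rest, r0.length ≤ r.length := by
    intro r hr
    have := hrows r hr
    simpa using this
  unfold MWNCM MWNCM_alt
  simp only [PySem.List.pyGetD_zero_cons]
  congr 2
  rw [pvAlabel_spec (r0 :: rest) r0.length hrows']
  rw [pvBlabel_spec (r0 :: rest) r0.length hrows']
  have hlen : ((r0 :: rest).length : Int)
      = ((chainRows (List.replicate r0.length 0) (r0 :: rest)).length : Int) := by
    rw [chainRows_length]
  rw [hlen, pvAitems_spec _ r0.length
    (chainRows_row_len r0.length (r0 :: rest) _ (by simp) hrows')]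

-- ===== VERDICT (by name: the statement is the Claim_ definition above) =====
theorem MWNCM_spec : Claim_equal_MWNCM := by
  intro W _ hpre
  unfold Spec_MWNCM
  exact MWNCM_eq W hpre
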